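-- pv_equiv track=rewrite | github.com/miliar/Code_Jam_Webscraper | solutions_python/solutions_year17_round2_nr2/347.py | solve
-- ===== SOURCE A (Python) =====
-- def solve(N,R,O,Y,G,B,V):
--     unicorns = list(reversed(sorted([[R,'R'],[O,'O'],[Y,'Y'],[G,'G'],[B,'B'],[V,'V']])))
--     stables = [None] * N
--     free = N
--
--     if unicorns[0][0] > N/2:
--         return 'IMPOSSIBLE'
--
--     next = 0
--     while unicorns[0][0]:
--         stables[next] = unicorns[0][1]
--         unicorns[0][0]-=1
--         next += 2
--         free -= 1
--
--     unicorns.pop(0)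
--
--     if unicorns[0][0] < free/2:
--         return 'IMPOSSIBLE'
--
--     while unicorns:
--         if next >= N:
--             next = 0
--
--         while stables[next] is not None:
--             next += 1
--
--         stables[next] = unicorns[0][1]
--         unicorns[0][0] -= 1
--         next += 2
--         free -= 1
--
--         while unicorns and unicorns[0][0] == 0:
--             unicorns.pop(0)
--
--     return ''.join(stables)
-- ===== SOURCE B (Python) =====
-- def solve(N,R,O,Y,G,B,V):
--     pairs = list(reversed(sorted([[R,'R'],[O,'O'],[Y,'Y'],[G,'G'],[B,'B'],[V,'V']])))
--     c1 = pairs[0][0]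
--     if c1 > N/2:
--         return 'IMPOSSIBLE'
--     free = N - c1
--     if pairs[1][0] < free/2:
--         return 'IMPOSSIBLE'
--     seq = ''.join(l * c for c, l in pairs)
--     positions = list(range(0, N, 2)) + list(range(1, N, 2))
--     res = [None] * N
--     for ch, pos in zip(seq, positions):
--         res[pos] = ch
--     return ''.join(res)
-- ===== Notes on version B (the rewrite author's own statement) =====
-- stated objective: simpler
-- what changed: A's two moving-pointer while-loops (place-at-next, wrap-around, linear skip over occupied stalls) are replaced by a direct schedule: sort descending, then write the concatenated colour sequence into positions list(range(0,N,2))+list(range(1,N,2)) in one zip/assignment pass; the two IMPOSSIBLE tests are kept verbatim. Pre_ excludes only inputs where A raises or loops forever (N=0, counts not summing to N, negative counts not caught by the IMPOSSIBLE tests).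
import Mathlib
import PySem

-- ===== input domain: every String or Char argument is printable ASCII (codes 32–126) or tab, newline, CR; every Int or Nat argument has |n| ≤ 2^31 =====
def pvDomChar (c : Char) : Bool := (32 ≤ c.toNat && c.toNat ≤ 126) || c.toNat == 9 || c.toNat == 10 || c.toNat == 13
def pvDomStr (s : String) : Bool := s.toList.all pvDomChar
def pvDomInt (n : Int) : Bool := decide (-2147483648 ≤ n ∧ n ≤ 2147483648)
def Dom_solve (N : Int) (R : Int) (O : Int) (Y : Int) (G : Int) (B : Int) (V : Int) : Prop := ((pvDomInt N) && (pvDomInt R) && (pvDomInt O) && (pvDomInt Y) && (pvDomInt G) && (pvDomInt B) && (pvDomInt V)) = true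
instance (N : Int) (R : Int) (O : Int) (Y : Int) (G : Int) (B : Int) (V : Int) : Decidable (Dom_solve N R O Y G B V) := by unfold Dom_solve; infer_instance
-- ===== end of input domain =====

-- B replaces A's two moving-pointer while-loops by an explicit position schedule
-- (evens 0,2,… then odds 1,3,…) zipped with the sorted colour sequence: simpler, same O(N) cost.

-- ===== PORT A =====
-- ''.join(stables): Python raises TypeError on a None entry — inside Pre_ every entry is a
-- one-character string; 'o.getD ""' is the total stand-in for the unreachable None case.
def pvJoin (st : List (Option String)) : String :=
  PySem.Str.join "" (st.map (fun o => o.getD ""))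

-- list(reversed(sorted([[R,'R'],…]))): Python compares the two-element lists lexicographically,
-- first the int then the (distinct) letter — exactly sorted2 with keys fst, snd.
-- This helper is the shared first line of Source A and Source B (both sort with the same expression).
def solveSort (R : Int) (O : Int) (Y : Int) (G : Int) (B : Int) (V : Int) : List (Int × String) :=
  (PySem.List.sorted2 [(R, "R"), (O, "O"), (Y, "Y"), (G, "G"), (B, "B"), (V, "V")]
    (fun p => p.1) (fun p => p.2) false).reverse

-- 'while unicorns[0][0]: stables[next] = …; next += 2' — fuel = the loop count c.toNat
-- (for c < 0 Python diverges/raises: outside Pre_).  stables[next]= raises IndexError when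
-- next ≥ N in Python; pySetD is its total stand-in (always in range inside Pre_).
def solveLoop1 : Nat → Int → String → List (Option String) → Int → Int →
    List (Option String) × Int × Int
  | 0, _, _, st, nx, fr => (st, nx, fr)
  | f + 1, c, l, st, nx, fr =>
    if c ≠ 0 then solveLoop1 f (c - 1) l (PySem.List.pySetD st nx (some l)) (nx + 2) (fr - 1)
    else (st, nx, fr)

-- 'while stables[next] is not None: next += 1' — pyGet? = stables[next] (none = IndexError,
-- where Python raises; unreachable inside Pre_); fuel st.length+1 always suffices in range.
def solveSkip : Nat → List (Option String) → Int → Int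
  | 0, _, nx => nx
  | f + 1, st, nx =>
    match PySem.List.pyGet? st nx with
    | some (some _) => solveSkip f st (nx + 1)
    | _ => nx

-- 'while unicorns and unicorns[0][0] == 0: unicorns.pop(0)'
def solvePops : List (Int × String) → List (Int × String)
  | [] => []
  | (c, l) :: rest => if c = 0 then solvePops rest else (c, l) :: rest

-- the main 'while unicorns:' loop; fuel = number of iterations left (= free inside Pre_;
-- with a bad input Python diverges or raises IndexError — outside Pre_).
def solveLoop2 (N : Int) : Nat → List (Int × String) → List (Option String) → Int → Int →
    List (Option String)
  | _, [], st, _, _ => st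
  | 0, _ :: _, st, _, _ => st
  | f + 1, (c, l) :: rest, st, nx, fr =>
    let nx0 := if nx ≥ N then 0 else nx
    let nx1 := solveSkip (st.length + 1) st nx0
    solveLoop2 N f (solvePops ((c - 1, l) :: rest)) (PySem.List.pySetD st nx1 (some l))
      (nx1 + 2) (fr - 1)

-- unicorns[0] / unicorns[1]: the list always has 6 resp. 5 elements, so headI is exact.
-- 'c > N/2' and 'c < free/2': float division of ints |·| ≤ 2^31 by 2 is exact, so the
-- comparisons are ported as the exact integer forms 2*c > N and 2*c < free.
def solve (N : Int) (R : Int) (O : Int) (Y : Int) (G : Int) (B : Int) (V : Int) : String :=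
  let unicorns := solveSort R O Y G B V
  let stables : List (Option String) := List.replicate N.toNat none   -- [None] * N
  if 2 * unicorns.headI.1 > N then "IMPOSSIBLE"
  else
    let r1 := solveLoop1 unicorns.headI.1.toNat unicorns.headI.1 unicorns.headI.2 stables 0 N
    -- unicorns.pop(0) : the list becomes unicorns.tail; r1.2.2 is 'free'
    if 2 * unicorns.tail.headI.1 < r1.2.2 then "IMPOSSIBLE"
    else pvJoin (solveLoop2 N (r1.2.2.toNat + 1) unicorns.tail r1.1 r1.2.1 r1.2.2)

-- ===== PORT B =====
-- Source B: same sort and the two exact IMPOSSIBLE tests, then seq = ''.join(l*c …) written into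
-- the schedule positions = list(range(0,N,2)) + list(range(1,N,2)) by one zip/assignment pass.
def solve_alt (N : Int) (R : Int) (O : Int) (Y : Int) (G : Int) (B : Int) (V : Int) : String :=
  let pairs := solveSort R O Y G B V
  if 2 * pairs.headI.1 > N then "IMPOSSIBLE"
  else if 2 * pairs.tail.headI.1 < N - pairs.headI.1 then "IMPOSSIBLE"
  else
    let seq := pairs.flatMap (fun p => List.replicate p.1.toNat p.2)   -- ''.join(l * c …)
    let positions := PySem.List.pyRange 0 N 2 ++ PySem.List.pyRange 1 N 2
    pvJoin ((seq.zip positions).foldl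
      (fun st cp => PySem.List.pySetD st cp.2 (some cp.1))   -- res[pos] = ch
      (List.replicate N.toNat none))

-- ===== PRECONDITION & SPEC =====
-- the six counts sorted descending, largest first (spec-side; not used by either port)
def pvSorted (R : Int) (O : Int) (Y : Int) (G : Int) (B : Int) (V : Int) : List Int :=
  List.insertionSort (· ≥ ·) [R, O, Y, G, B, V]

-- Pre_ = exactly the inputs on which the Python A returns: one of the two IMPOSSIBLE tests
-- fires (with max count ≥ 0 so the first placement loop halts), or the input is a genuine
-- instance (nonnegative counts summing to N ≥ 1).  Excluded are only inputs where A raises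
-- (IndexError/TypeError) or loops forever (N = 0, counts not summing to N, negative counts).
def Pre_solve (N : Int) (R : Int) (O : Int) (Y : Int) (G : Int) (B : Int) (V : Int) : Prop :=
  2 * (pvSorted R O Y G B V).headI > N ∨
  (0 ≤ (pvSorted R O Y G B V).headI ∧ 2 * (pvSorted R O Y G B V).headI ≤ N ∧
    2 * (pvSorted R O Y G B V).tail.headI < N - (pvSorted R O Y G B V).headI) ∨
  (0 ≤ R ∧ 0 ≤ O ∧ 0 ≤ Y ∧ 0 ≤ G ∧ 0 ≤ B ∧ 0 ≤ V ∧ R + O + Y + G + B + V = N ∧ 1 ≤ N)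
instance (N : Int) (R : Int) (O : Int) (Y : Int) (G : Int) (B : Int) (V : Int) : Decidable (Pre_solve N R O Y G B V) := by unfold Pre_solve; infer_instance

def pvWitness_solve : Int × Int × Int × Int × Int × Int × Int := (4, 2, 1, 1, 0, 0, 0)

def Spec_solve (N : Int) (R : Int) (O : Int) (Y : Int) (G : Int) (B : Int) (V : Int) (out : String) : Prop := out = solve_alt N R O Y G B V
instance (N : Int) (R : Int) (O : Int) (Y : Int) (G : Int) (B : Int) (V : Int) (out : String) : Decidable (Spec_solve N R O Y G B V out) := by unfold Spec_solve; infer_instance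

-- ===== CLAIM (what is proved, stated in full; the proofs are below) =====
def Claim_equal_solve : Prop := ∀ (N : Int) (R : Int) (O : Int) (Y : Int) (G : Int) (B : Int) (V : Int), Dom_solve N R O Y G B V → Pre_solve N R O Y G B V → Spec_solve N R O Y G B V (solve N R O Y G B V)

-- ===== LEMMAS AND PROOFS =====

-- proof-side abbreviations
def pvRep (p : Int × String) : List String := List.replicate p.1.toNat p.2
def pvAssign (st : List (Option String)) (l : List (String × Int)) : List (Option String) :=
  l.foldl (fun st cp => PySem.List.pySetD st cp.2 (some cp.1)) st
def pvPos (N : Int) : List Int := PySem.List.pyRange 0 N 2 ++ PySem.List.pyRange 1 N 2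
def pvE (N : Int) : Nat := (N.toNat + 1) / 2
def pvP (N : Int) (k : Nat) : Int := if k < pvE N then 2 * k else 2 * (k - pvE N) + 1
def pvNx (N : Int) (k : Nat) : Int :=
  if k < pvE N then 2 * k else if k = pvE N then 2 * (pvE N) else 2 * (k - pvE N) + 1

theorem pv_pairwise_insertBy {α : Type} (before : α → α → Bool) (R : α → α → Prop)
    (htr : ∀ a b c, R a b → R b c → R a c) (h1 : ∀ a b, before a b = true → R a b)
    (h2 : ∀ a b, ¬ before a b = true → R b a) (x : α) :
    ∀ l : List α, l.Pairwise R → (PySem.List.insertBy before x l).Pairwise R := by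
  intro l
  induction l with
  | nil => intro _; simp [PySem.List.insertBy]
  | cons y ys ih =>
    intro hl
    show (if before x y = true then x :: y :: ys else y :: PySem.List.insertBy before x ys).Pairwise R
    rcases List.pairwise_cons.mp hl with ⟨hy, hys⟩
    by_cases hb : before x y = true
    · rw [if_pos hb]
      refine List.pairwise_cons.mpr ⟨?_, hl⟩
      intro z hz
      rcases List.mem_cons.mp hz with rfl | hz
      · exact h1 _ _ hb
      · exact htr _ _ _ (h1 _ _ hb) (hy z hz)
    · rw [if_neg hb]
      refine List.pairwise_cons.mpr ⟨?_, ih hys⟩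
      intro z hz
      rcases (PySem.List.mem_insertBy _ _ _ _).mp hz with rfl | hz
      · exact h2 _ _ hb
      · exact hy z hz

theorem pv_sorted2_pairwise (xs : List (Int × String)) :
    (PySem.List.sorted2 xs (fun p => p.1) (fun p => p.2) false).Pairwise
      (fun a b => a.1 ≤ b.1) := by
  have hbf : ∀ (acc : List (Int × String)),
      acc.Pairwise (fun a b : Int × String => a.1 ≤ b.1) →
      (xs.foldl (fun acc x => PySem.List.insertBy
        (fun a b : Int × String => decide (a.1 < b.1) || (!decide (b.1 < a.1) && decide (a.2 < b.2)))
        x acc) acc).Pairwise (fun a b : Int × String => a.1 ≤ b.1) := by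
    induction xs with
    | nil => intro acc hp; exact hp
    | cons x t ih =>
      intro acc hp
      show ((fun acc x => PySem.List.insertBy
        (fun a b : Int × String => decide (a.1 < b.1) || (!decide (b.1 < a.1) && decide (a.2 < b.2)))
        x acc) acc x |> t.foldl (fun acc x => PySem.List.insertBy
        (fun a b : Int × String => decide (a.1 < b.1) || (!decide (b.1 < a.1) && decide (a.2 < b.2)))
        x acc)).Pairwise (fun a b : Int × String => a.1 ≤ b.1)
      refine ih _ (pv_pairwise_insertBy _ (fun a b : Int × String => a.1 ≤ b.1) (fun a b c h1 h2 => le_trans h1 h2) ?_ ?_ x acc hp)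
      · intro a b h
        simp only [Bool.or_eq_true, Bool.and_eq_true, decide_eq_true_eq, Bool.not_eq_eq_eq_not,
          Bool.not_true, decide_eq_false_iff_not] at h
        rcases h with h | ⟨h, _⟩ <;> omega
      · intro a b h
        simp only [Bool.or_eq_true, Bool.and_eq_true, decide_eq_true_eq, Bool.not_eq_eq_eq_not,
          Bool.not_true, decide_eq_false_iff_not] at h
        have h1 : ¬ a.1 < b.1 := fun hh => h (Or.inl hh)
        omega
  have := hbf [] (by simp)
  simpa [PySem.List.sorted2] using this

theorem pv_sort_perm (R O Y G B V : Int) :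
    (solveSort R O Y G B V).Perm [(R, "R"), (O, "O"), (Y, "Y"), (G, "G"), (B, "B"), (V, "V")] := by
  exact (List.reverse_perm _).trans (PySem.List.sorted2_perm _ _ _ _)

theorem pv_sort_fst (R O Y G B V : Int) :
    (solveSort R O Y G B V).map (fun p => p.1) = pvSorted R O Y G B V := by
  have hperm : ((solveSort R O Y G B V).map (fun p => p.1)).Perm (pvSorted R O Y G B V) := by
    refine ((pv_sort_perm R O Y G B V).map _).trans ?_
    simp only [List.map_cons, List.map_nil]
    exact (List.perm_insertionSort _ _).symm
  have hs1 : ((solveSort R O Y G B V).map (fun p => p.1)).Pairwise (· ≥ ·) := by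
    rw [List.pairwise_map]
    unfold solveSort
    rw [List.pairwise_reverse]
    exact pv_sorted2_pairwise _
  have hs2 : (pvSorted R O Y G B V).Pairwise (· ≥ ·) := List.pairwise_insertionSort _ _
  exact List.Perm.eq_of_pairwise (fun a b _ _ hab hba => le_antisymm hba hab) hs1 hs2 hperm

theorem pv_loop1_eq (l : String) : ∀ (n : Nat) (c : Int), c = (n : Int) →
    ∀ (st : List (Option String)) (nx fr : Int),
    solveLoop1 n c l st nx fr =
      (pvAssign st ((List.range n).map (fun j : Nat => (l, nx + 2 * (j : Int)))), nx + 2 * c, fr - c) := by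
  intro n
  induction n with
  | zero =>
    intro c hc st nx fr
    subst hc
    show (st, nx, fr) = _
    simp [pvAssign]
  | succ m ih =>
    intro c hc st nx fr
    subst hc
    rw [solveLoop1, if_pos (show ¬ ((m + 1 : Nat) : Int) = 0 by omega)]
    rw [ih (((m + 1 : Nat) : Int) - 1) (by omega)]
    have hmap : (List.range (m + 1)).map (fun j : Nat => (l, nx + 2 * (j : Int))) =
        (l, nx) :: (List.range m).map (fun j : Nat => (l, (nx + 2) + 2 * (j : Int))) := by
      rw [List.range_succ_eq_map, List.map_cons, List.map_map]
      refine congrArg₂ _ (by norm_num) (List.map_congr_left fun j _ => ?_)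
      simp only [Function.comp_apply, Prod.mk.injEq, true_and]
      push_cast
      ring
    rw [hmap]
    show (pvAssign (PySem.List.pySetD st nx (some l)) _, _, _) =
      (pvAssign (PySem.List.pySetD st nx (some l)) _, _, _)
    refine congrArg₂ _ rfl ?_
    simp only [Prod.mk.injEq]
    constructor <;> push_cast <;> ring

theorem pv_assign_append (st : List (Option String)) (l1 l2 : List (String × Int)) :
    pvAssign st (l1 ++ l2) = pvAssign (pvAssign st l1) l2 := by
  simp [pvAssign, List.foldl_append]

theorem pv_assign_length : ∀ (l : List (String × Int)) (st : List (Option String)),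
    (pvAssign st l).length = st.length := by
  intro l
  induction l with
  | nil => intro st; rfl
  | cons cp t ih =>
    intro st
    show (pvAssign (PySem.List.pySetD st cp.2 (some cp.1)) t).length = st.length
    rw [ih]
    simp [PySem.List.length_pySetD]

theorem pv_assign_get_not_mem : ∀ (l : List (String × Int)) (st : List (Option String)) (j : Nat),
    (∀ cp ∈ l, 0 ≤ cp.2 ∧ cp.2.toNat ≠ j) → (pvAssign st l)[j]? = st[j]? := by
  intro l
  induction l with
  | nil => intro st j _; rfl
  | cons cp t ih =>
    intro st j h
    have hcp := h cp (by simp)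
    show (pvAssign (PySem.List.pySetD st cp.2 (some cp.1)) t)[j]? = st[j]?
    rw [ih _ _ (fun x hx => h x (by simp [hx]))]
    rw [PySem.List.pySetD_of_nonneg _ _ hcp.1, List.getElem?_set_ne hcp.2]

theorem pv_assign_get_filled : ∀ (l : List (String × Int)) (st : List (Option String)) (j : Nat),
    j < st.length → (∀ cp ∈ l, 0 ≤ cp.2) →
    ((∃ cp ∈ l, cp.2.toNat = j) ∨ ∃ ch, st[j]? = some (some ch)) →
    ∃ ch, (pvAssign st l)[j]? = some (some ch) := by
  intro l
  induction l with
  | nil =>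
    intro st j _ _ h
    rcases h with ⟨cp, h, _⟩ | h
    · simp at h
    · exact h
  | cons cp t ih =>
    intro st j hj hnn h
    have hcp0 : (0:Int) ≤ cp.2 := hnn cp (by simp)
    show ∃ ch, (pvAssign (PySem.List.pySetD st cp.2 (some cp.1)) t)[j]? = some (some ch)
    have hlen : (PySem.List.pySetD st cp.2 (some cp.1)).length = st.length := by
      simp [PySem.List.length_pySetD]
    apply ih _ _ (by omega) (fun x hx => hnn x (by simp [hx]))
    rcases h with ⟨cq, hq, hqj⟩ | ⟨ch, hch⟩
    · rcases List.mem_cons.mp hq with rfl | hq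
      · right
        refine ⟨cq.1, ?_⟩
        rw [PySem.List.pySetD_of_nonneg _ _ hcp0, hqj, List.getElem?_set_self hj]
      · exact Or.inl ⟨cq, hq, hqj⟩
    · by_cases heq : cp.2.toNat = j
      · right
        refine ⟨cp.1, ?_⟩
        rw [PySem.List.pySetD_of_nonneg _ _ hcp0, heq, List.getElem?_set_self hj]
      · right
        refine ⟨ch, ?_⟩
        rw [PySem.List.pySetD_of_nonneg _ _ hcp0, List.getElem?_set_ne heq, hch]

theorem pv_pops_flatMap : ∀ us : List (Int × String),
    (solvePops us).flatMap pvRep = us.flatMap pvRep := by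
  intro us
  induction us with
  | nil => rfl
  | cons p t ih =>
    obtain ⟨c, l⟩ := p
    show (if c = 0 then solvePops t else (c, l) :: t).flatMap pvRep = _
    by_cases hc : c = 0
    · subst hc; simp [ih, pvRep]
    · simp [hc]

theorem pv_pops_sum : ∀ us : List (Int × String),
    ((solvePops us).map (fun p => p.1)).sum = (us.map (fun p => p.1)).sum := by
  intro us
  induction us with
  | nil => rfl
  | cons p t ih =>
    obtain ⟨c, l⟩ := p
    show ((if c = 0 then solvePops t else (c, l) :: t).map (fun p => p.1)).sum = _
    by_cases hc : c = 0
    · subst hc; simp [ih]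
    · simp [hc]

theorem pv_pops_sub : ∀ us : List (Int × String), ∀ p ∈ solvePops us, p ∈ us := by
  intro us
  induction us with
  | nil => intro p h; exact h
  | cons q t ih =>
    obtain ⟨c, l⟩ := q
    intro p h
    by_cases hc : c = 0
    · subst hc
      simp only [solvePops, if_pos] at h
      exact List.mem_cons_of_mem _ (ih p h)
    · simp only [solvePops, if_neg hc] at h
      exact h

theorem pv_pops_head : ∀ us : List (Int × String), (∀ p ∈ us, 0 ≤ p.1) →
    solvePops us = [] ∨ ∃ c l rest, solvePops us = (c, l) :: rest ∧ 0 < c := by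
  intro us
  induction us with
  | nil => intro _; left; rfl
  | cons q t ih =>
    obtain ⟨c, l⟩ := q
    intro h
    by_cases hc : c = 0
    · subst hc
      simp only [solvePops, if_pos]
      exact ih (fun p hp => h p (by simp [hp]))
    · right
      refine ⟨c, l, t, by simp [solvePops, hc], ?_⟩
      have := h (c, l) (by simp)
      simp at this
      omega

theorem pv_flatMap_len : ∀ ps : List (Int × String), (∀ p ∈ ps, 0 ≤ p.1) →
    ((ps.flatMap pvRep).length : Int) = (ps.map (fun p => p.1)).sum := by
  intro ps
  induction ps with
  | nil => intro _; rfl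
  | cons p t ih =>
    intro h
    have h0 := h p (by simp)
    simp only [List.flatMap_cons, List.length_append, List.map_cons, List.sum_cons]
    rw [← ih (fun q hq => h q (by simp [hq]))]
    simp [pvRep]
    omega

theorem pv_ev_eq (N : Int) (hN : 1 ≤ N) :
    PySem.List.pyRange 0 N 2 = (List.range (pvE N)).map (fun j : Nat => 2 * (j : Int)) := by
  rw [PySem.List.pyRange_of_pos 0 N (by omega), if_pos (by omega : (0:Int) < N)]
  rw [show ((N - 0 + 2 - 1) / 2).toNat = pvE N by unfold pvE; omega]
  exact List.map_congr_left fun j _ => by ring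

theorem pv_od_eq (N : Int) (hN : 1 ≤ N) :
    PySem.List.pyRange 1 N 2 =
      (List.range (N.toNat - pvE N)).map (fun j : Nat => 2 * (j : Int) + 1) := by
  rw [PySem.List.pyRange_of_pos 1 N (by omega)]
  by_cases h1 : (1:Int) < N
  · rw [if_pos h1, show ((N - 1 + 2 - 1) / 2).toNat = N.toNat - pvE N by unfold pvE; omega]
    exact List.map_congr_left fun j _ => by ring
  · rw [if_neg h1, show N.toNat - pvE N = 0 by unfold pvE; omega]
    rfl

theorem pv_pos_length (N : Int) (hN : 1 ≤ N) : (pvPos N).length = N.toNat := by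
  unfold pvPos
  rw [pv_ev_eq N hN, pv_od_eq N hN]
  simp only [List.length_append, List.length_map, List.length_range]
  unfold pvE
  omega

theorem pv_pos_get (N : Int) (hN : 1 ≤ N) (k : Nat) (hk : k < N.toNat) :
    (pvPos N)[k]? = some (pvP N k) := by
  unfold pvPos pvP
  rw [pv_ev_eq N hN, pv_od_eq N hN]
  by_cases h : k < pvE N
  · rw [if_pos h, List.getElem?_append_left (by simpa using h)]
    rw [List.getElem?_map, List.getElem?_range h]
    rfl
  · rw [if_neg h, List.getElem?_append_right (by simpa using not_lt.mp h)]
    have h2 : k - pvE N < N.toNat - pvE N := by unfold pvE at *; omega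
    simp only [List.length_map, List.length_range]
    rw [List.getElem?_map, List.getElem?_range h2]
    simp only [Option.map_some, Option.some.injEq]
    omega

theorem pv_mem_pos_take (N : Int) (hN : 1 ≤ N) (k : Nat) (x : Int) :
    x ∈ (pvPos N).take k ↔
      (∃ j : Nat, j < min k (pvE N) ∧ x = 2 * (j : Int)) ∨
      (∃ j : Nat, j < min (k - pvE N) (N.toNat - pvE N) ∧ x = 2 * (j : Int) + 1) := by
  unfold pvPos
  rw [pv_ev_eq N hN, pv_od_eq N hN, List.take_append]
  simp only [← List.map_take, List.take_range, List.length_map, List.length_range,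
    List.mem_append, List.mem_map, List.mem_range]
  constructor
  · rintro (⟨j, hj, rfl⟩ | ⟨j, hj, rfl⟩)
    · exact Or.inl ⟨j, hj, rfl⟩
    · exact Or.inr ⟨j, hj, rfl⟩
  · rintro (⟨j, hj, rfl⟩ | ⟨j, hj, rfl⟩)
    · exact Or.inl ⟨j, hj, rfl⟩
    · exact Or.inr ⟨j, hj, rfl⟩

-- take commutes with zip (not found in Mathlib/PySem by search)
theorem pv_take_zip : ∀ (n : Nat) (l1 : List String) (l2 : List Int),
    (l1.zip l2).take n = (l1.take n).zip (l2.take n) := by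
  intro n
  induction n with
  | zero => simp
  | succ m ih =>
    intro l1 l2
    cases l1 with
    | nil => simp
    | cons a t1 =>
      cases l2 with
      | nil => simp
      | cons b t2 => simp [List.zip_cons_cons, ih]

-- stepping/stopping equations for the inner skip loop
theorem pv_skip_stop (f : Nat) (st : List (Option String)) (nx : Int)
    (h : PySem.List.pyGet? st nx = some none) : solveSkip (f + 1) st nx = nx := by
  simp [solveSkip, h]

theorem pv_skip_step (f : Nat) (st : List (Option String)) (nx : Int) (ch : String)
    (h : PySem.List.pyGet? st nx = some (some ch)) :
    solveSkip (f + 1) st nx = solveSkip f st (nx + 1) := by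
  simp [solveSkip, h]

-- the main loop of A writes seq[k] into position P[k] for k = k₀ … N-1
theorem pv_loop2_eq (N : Int) (seq : List String) (hN : 1 ≤ N) (hseq : seq.length = N.toNat) :
    ∀ (m k : Nat) (us : List (Int × String)) (st : List (Option String)) (nx fr : Int),
    k ≤ N.toNat →
    (∀ p ∈ us, 0 ≤ p.1) →
    (us.map (fun p => p.1)).sum = N - k →
    (us = [] ∨ ∃ c l rest, us = (c, l) :: rest ∧ 0 < c) →
    us.flatMap pvRep = seq.drop k →
    st = pvAssign (List.replicate N.toNat none) ((seq.zip (pvPos N)).take k) →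
    nx = pvNx N k →
    N.toNat - k ≤ m →
    solveLoop2 N m us st nx fr = pvAssign st ((seq.zip (pvPos N)).drop k) := by
  have hZlen : (seq.zip (pvPos N)).length = N.toNat := by
    rw [List.length_zip, hseq, pv_pos_length N hN]; simp
  -- the terminal situation k = N.toNat : the unicorn list is exhausted
  have hfin : ∀ (m : Nat) (us : List (Int × String)) (st : List (Option String)) (nx fr : Int),
      (∀ p ∈ us, 0 ≤ p.1) →
      (us.map (fun p => p.1)).sum = N - N.toNat →
      (us = [] ∨ ∃ c l rest, us = (c, l) :: rest ∧ 0 < c) →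
      solveLoop2 N m us st nx fr = pvAssign st ((seq.zip (pvPos N)).drop N.toNat) := by
    intro m us st nx fr hnn hsum hhead
    have husnil : us = [] := by
      rcases hhead with h | ⟨c, l, rest, rfl, hc⟩
      · exact h
      · exfalso
        have hr : (0:Int) ≤ (rest.map (fun p => p.1)).sum := by
          apply List.sum_nonneg
          intro x hx
          rcases List.mem_map.mp hx with ⟨p, hp, rfl⟩
          exact hnn p (by simp [hp])
        simp only [List.map_cons, List.sum_cons] at hsum
        omega
    subst husnil
    have hdrop : (seq.zip (pvPos N)).drop N.toNat = [] := by
      apply List.drop_of_length_le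
      omega
    rw [hdrop]
    cases m <;> rfl
  intro m
  induction m with
  | zero =>
    intro k us st nx fr hk hnn hsum hhead hflat hst hnx hfuel
    have hkn : k = N.toNat := by omega
    subst hkn
    exact hfin 0 us st nx fr hnn hsum hhead
  | succ m ih =>
    intro k us st nx fr hk hnn hsum hhead hflat hst hnx hfuel
    by_cases hkn : k = N.toNat
    · subst hkn
      exact hfin (m + 1) us st nx fr hnn hsum hhead
    have hklt : k < N.toNat := by omega
    -- the unicorn list is nonempty with a positive head count
    have husne : us ≠ [] := by
      intro h
      subst h
      simp only [List.map_nil, List.sum_nil] at hsum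
      omega
    rcases hhead with h | ⟨c, l, rest, rfl, hc⟩
    · exact absurd h husne
    clear husne
    have hrestnn : ∀ p ∈ rest, (0:Int) ≤ p.1 := fun p hp => hnn p (by simp [hp])
    -- peel one letter off the flattened sequence
    have hkseq : k < seq.length := by omega
    have hrep1 : pvRep (c, l) = l :: pvRep (c - 1, l) := by
      unfold pvRep
      simp only
      rw [show c.toNat = (c - 1).toNat + 1 by omega, List.replicate_succ]
    have hflat' : seq.drop k = l :: ((c - 1, l) :: rest).flatMap pvRep := by
      rw [← hflat]
      simp only [List.flatMap_cons]
      rw [hrep1]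
      simp
    have hdropk : seq.drop k = seq[k] :: seq.drop (k + 1) := List.drop_eq_getElem_cons hkseq
    have hseqk : seq[k] = l := by
      rw [hdropk] at hflat'
      exact (List.cons_eq_cons.mp hflat').1
    have hdropk1 : seq.drop (k + 1) = ((c - 1, l) :: rest).flatMap pvRep := by
      rw [hdropk] at hflat'
      exact (List.cons_eq_cons.mp hflat').2
    -- basic size facts
    have he1 : 1 ≤ pvE N := by unfold pvE; omega
    have he2 : pvE N = (N.toNat + 1) / 2 := rfl
    have hstlen : st.length = N.toNat := by
      rw [hst, pv_assign_length]
      simp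
    -- reading an untouched cell of st
    have hTsub : ∀ cp ∈ (seq.zip (pvPos N)).take k, cp.2 ∈ (pvPos N).take k := by
      intro cp hcp
      rw [pv_take_zip] at hcp
      exact (List.of_mem_zip hcp).2
    have hnotmem : ∀ j : Nat,
        (∀ i : Nat, i < min k (pvE N) → j ≠ 2 * i) →
        (∀ i : Nat, i < min (k - pvE N) (N.toNat - pvE N) → j ≠ 2 * i + 1) →
        st[j]? = (List.replicate N.toNat (none : Option String))[j]? := by
      intro j h1 h2
      rw [hst]
      apply pv_assign_get_not_mem
      intro cp hcp
      rcases (pv_mem_pos_take N hN k cp.2).mp (hTsub cp hcp) with ⟨i, hi, hei⟩ | ⟨i, hi, hei⟩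
      · exact ⟨by omega, by have := h1 i hi; omega⟩
      · exact ⟨by omega, by have := h2 i hi; omega⟩
    have hreplget : ∀ j : Nat, j < N.toNat →
        (List.replicate N.toNat (none : Option String))[j]? = some none := by
      intro j hj
      simp [hj]
    -- the write position p = P[k] and the skip-loop computation
    have hplen : (pvPos N).length = N.toNat := pv_pos_length N hN
    have hpval : ∀ (j : Nat) (hj : j < N.toNat),
        (seq.zip (pvPos N))[j]? = some (seq[j]'(by omega), pvP N j) := by
      intro j hj
      rw [List.getElem?_eq_getElem (by omega : j < (seq.zip (pvPos N)).length), List.getElem_zip]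
      have hg := pv_pos_get N hN j hj
      rw [List.getElem?_eq_getElem (by omega : j < (pvPos N).length)] at hg
      simp only [Option.some.injEq] at hg
      simp [hg]
    have hskip : solveSkip (st.length + 1) st (if nx ≥ N then 0 else nx) = pvP N k := by
      rcases lt_trichotomy k (pvE N) with hke | hke | hke
      · -- still in the even phase: no wrap, the target cell is free
        have hnx2 : nx = 2 * (k : Int) := by rw [hnx]; unfold pvNx; rw [if_pos hke]
        have hlt : ¬ nx ≥ N := by omega
        rw [if_neg hlt, hstlen, hnx2]
        have hget : PySem.List.pyGet? st (2 * (k : Int)) = some none := by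
          rw [PySem.List.pyGet?_of_nonneg st (by omega)]
          rw [show (2 * (k : Int)).toNat = 2 * k by omega]
          rw [hnotmem (2 * k) (fun i hi => by omega) (fun i hi => by omega)]
          exact hreplget _ (by omega)
        rw [pv_skip_stop _ _ _ hget]
        unfold pvP
        rw [if_pos hke]
      · -- phase change: wrap to 0 (occupied), stop at 1
        have hnx2 : nx = 2 * (pvE N : Int) := by
          rw [hnx]; unfold pvNx; rw [if_neg (by omega), if_pos hke]
        have hge : nx ≥ N := by omega
        rw [if_pos hge, hstlen]
        have hn2 : 2 ≤ N.toNat := by omega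
        have hget0 : ∃ ch, PySem.List.pyGet? st 0 = some (some ch) := by
          rw [PySem.List.pyGet?_of_nonneg st (by omega)]
          rw [show ((0:Int)).toNat = 0 by omega]
          rw [hst]
          apply pv_assign_get_filled
          · simp; omega
          · intro cp hcp
            rcases (pv_mem_pos_take N hN k cp.2).mp (hTsub cp hcp) with ⟨i, _, hei⟩ | ⟨i, _, hei⟩ <;> omega
          · left
            refine ⟨(seq[0]'(by omega), pvP N 0), ?_, ?_⟩
            · have h0 : (seq.zip (pvPos N))[0]? = some (seq[0]'(by omega), pvP N 0) :=
                hpval 0 (by omega)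
              have h0' : ((seq.zip (pvPos N)).take k)[0]? = some (seq[0]'(by omega), pvP N 0) := by
                rw [List.getElem?_take_of_lt (by omega)]
                exact h0
              exact List.mem_of_getElem? h0'
            · unfold pvP
              rw [if_pos (by omega)]
              simp
        have hget1 : PySem.List.pyGet? st 1 = some none := by
          rw [PySem.List.pyGet?_of_nonneg st (by omega)]
          rw [show ((1:Int)).toNat = 1 by omega]
          rw [hnotmem 1 (fun i hi => by omega) (fun i hi => by omega)]
          exact hreplget _ (by omega)
        obtain ⟨ch, hch⟩ := hget0
        rw [show N.toNat + 1 = (N.toNat - 1) + 1 + 1 by omega]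
        rw [pv_skip_step _ _ _ _ hch]
        rw [show (0:Int) + 1 = 1 by omega]
        rw [show N.toNat - 1 = (N.toNat - 2) + 1 by omega]
        rw [pv_skip_stop _ _ _ hget1]
        unfold pvP
        rw [if_neg (by omega)]
        omega
      · -- odd phase: no wrap, the target cell is free
        have hnx2 : nx = 2 * ((k : Int) - (pvE N : Int)) + 1 := by
          rw [hnx]; unfold pvNx; rw [if_neg (by omega), if_neg (by omega)]
        have hlt : ¬ nx ≥ N := by omega
        rw [if_neg hlt, hstlen, hnx2]
        have hget : PySem.List.pyGet? st (2 * ((k : Int) - (pvE N : Int)) + 1) = some none := by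
          rw [PySem.List.pyGet?_of_nonneg st (by omega)]
          rw [show (2 * ((k : Int) - (pvE N : Int)) + 1).toNat = 2 * (k - pvE N) + 1 by omega]
          rw [hnotmem (2 * (k - pvE N) + 1) (fun i hi => by omega) (fun i hi => by omega)]
          exact hreplget _ (by omega)
        rw [pv_skip_stop _ _ _ hget]
        unfold pvP
        rw [if_neg (by omega)]
    -- one unfolding of the outer loop
    have hstep : solveLoop2 N (m + 1) ((c, l) :: rest) st nx fr =
        solveLoop2 N m (solvePops ((c - 1, l) :: rest))
          (PySem.List.pySetD st (solveSkip (st.length + 1) st (if nx ≥ N then 0 else nx)) (some l))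
          (solveSkip (st.length + 1) st (if nx ≥ N then 0 else nx) + 2) (fr - 1) := rfl
    rw [hstep, hskip]
    -- the new stable configuration is the (k+1)-prefix assignment
    have hZk : (seq.zip (pvPos N))[k]? = some (l, pvP N k) := by
      rw [hpval k (by omega), hseqk]
    have hst' : PySem.List.pySetD st (pvP N k) (some l) =
        pvAssign (List.replicate N.toNat none) ((seq.zip (pvPos N)).take (k + 1)) := by
      rw [List.take_add_one, hZk]
      simp only [Option.toList_some]
      rw [pv_assign_append, ← hst]
      rfl
    -- apply the induction hypothesis at k+1
    rw [ih (k + 1) (solvePops ((c - 1, l) :: rest))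
        (PySem.List.pySetD st (pvP N k) (some l)) (pvP N k + 2) (fr - 1)
        (by omega)
        (fun p hp => by
          rcases List.mem_cons.mp (pv_pops_sub _ p hp) with rfl | hp2
          · simp; omega
          · exact hrestnn p hp2)
        (by
          rw [pv_pops_sum]
          simp only [List.map_cons, List.sum_cons] at hsum ⊢
          push_cast
          omega)
        (pv_pops_head _ (fun p hp => by
          rcases List.mem_cons.mp hp with rfl | hp2
          · simp; omega
          · exact hrestnn p hp2))
        (by rw [pv_pops_flatMap, hdropk1])
        hst'
        (by
          unfold pvNx
          unfold pvP
          split_ifs <;> omega)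
        (by omega)]
    -- reassemble: drop k = Z[k] :: drop (k+1)
    have hdropZ : (seq.zip (pvPos N)).drop k = (l, pvP N k) :: (seq.zip (pvPos N)).drop (k + 1) := by
      rw [List.drop_eq_getElem_cons (by omega : k < (seq.zip (pvPos N)).length)]
      rw [List.getElem?_eq_getElem (by omega : k < (seq.zip (pvPos N)).length)] at hZk
      simp only [Option.some.injEq] at hZk
      rw [hZk]
    rw [hdropZ]
    rfl

-- ===== VERDICT (by name: the statement is the Claim_ definition above) =====
theorem solve_spec : Claim_equal_solve := by
  unfold Claim_equal_solve
  intro N R O Y G B V hdom hpre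
  unfold Spec_solve
  have hperm := pv_sort_perm R O Y G B V
  have hfst := pv_sort_fst R O Y G B V
  have hlen : (solveSort R O Y G B V).length = 6 := by rw [hperm.length_eq]; rfl
  obtain ⟨p0, p1, tl, hps⟩ : ∃ p0 p1 tl, solveSort R O Y G B V = p0 :: p1 :: tl := by
    rcases hx : solveSort R O Y G B V with _ | ⟨q0, _ | ⟨q1, qtl⟩⟩
    · rw [hx] at hlen; simp at hlen
    · rw [hx] at hlen; simp at hlen
    · exact ⟨q0, q1, qtl, rfl⟩
  rw [hps] at hfst
  simp only [List.map_cons] at hfst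
  unfold Pre_solve at hpre
  rw [← hfst] at hpre
  simp only [List.headI, List.tail_cons] at hpre
  simp only [solve, solve_alt, hps, List.headI, List.tail_cons]
  by_cases hchk1 : 2 * p0.1 > N
  · rw [if_pos hchk1, if_pos hchk1]
  rw [if_neg hchk1, if_neg hchk1]
  have hc1nn : 0 ≤ p0.1 := by
    rcases hpre with h | h | h
    · omega
    · exact h.1
    · have hmem : p0 ∈ solveSort R O Y G B V := by rw [hps]; simp
      have := hperm.mem_iff.mp hmem
      simp only [List.mem_cons, List.not_mem_nil, or_false] at this
      rcases this with h0 | h0 | h0 | h0 | h0 | h0 <;> rw [h0] <;> simp <;> omega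
  rw [pv_loop1_eq p0.2 p0.1.toNat p0.1 (by omega)]
  simp only []
  by_cases hchk2 : 2 * p1.1 < N - p0.1
  · rw [if_pos hchk2, if_pos hchk2]
  rw [if_neg hchk2, if_neg hchk2]
  -- now inside the genuine-instance region
  have hreg : 0 ≤ R ∧ 0 ≤ O ∧ 0 ≤ Y ∧ 0 ≤ G ∧ 0 ≤ B ∧ 0 ≤ V ∧ R + O + Y + G + B + V = N ∧ 1 ≤ N := by
    rcases hpre with h | h | h
    · omega
    · exact absurd h.2.2 hchk2
    · exact h
  have hN : 1 ≤ N := hreg.2.2.2.2.2.2.2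
  have hnnall : ∀ p ∈ solveSort R O Y G B V, (0:Int) ≤ p.1 := by
    intro p hp
    have := hperm.mem_iff.mp hp
    simp only [List.mem_cons, List.not_mem_nil, or_false] at this
    rcases this with h0 | h0 | h0 | h0 | h0 | h0 <;> rw [h0] <;> simp <;> omega
  have hsumall : ((solveSort R O Y G B V).map (fun p => p.1)).sum = N := by
    have := (hperm.map (fun p => p.1)).sum_eq
    rw [this]
    simp
    omega
  set seq : List String := (p0 :: p1 :: tl).flatMap pvRep with hseqdef
  have hseqlen : seq.length = N.toNat := by
    have h1 := pv_flatMap_len (p0 :: p1 :: tl) (by rw [← hps]; exact hnnall)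
    rw [← hps, hsumall] at h1
    rw [← hps] at hseqdef
    rw [hseqdef]
    omega
  set k := p0.1.toNat with hkdef
  have hkc : (k : Int) = p0.1 := by omega
  have hke : k ≤ pvE N := by unfold pvE; omega
  have hkn : k ≤ N.toNat := by omega
  have hsum0 : p0.1 + ((p1 :: tl).map (fun p => p.1)).sum = N := by
    rw [hps] at hsumall
    simp only [List.map_cons, List.sum_cons] at hsumall ⊢
    omega
  have hfree : 0 < N - p0.1 := by omega
  have hp1pos : 0 < p1.1 := by omega
  -- seq decomposes as k copies of the first letter, then the rest
  have hsplit : seq = List.replicate k p0.2 ++ (p1 :: tl).flatMap pvRep := by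
    rw [hseqdef]
    simp only [List.flatMap_cons]
    rfl
  have hseqtake : seq.take k = List.replicate k p0.2 := by
    rw [hsplit]
    exact List.take_left' (by simp)
  have hseqdrop : seq.drop k = (p1 :: tl).flatMap pvRep := by
    rw [hsplit]
    exact List.drop_left' (by simp)
  -- the stable array after the first loop is the k-prefix assignment
  have hpostake : (pvPos N).take k = (List.range k).map (fun j : Nat => 2 * (j : Int)) := by
    unfold pvPos
    rw [pv_ev_eq N hN]
    rw [List.take_append_of_le_length (by simpa using hke)]
    rw [← List.map_take, List.take_range, Nat.min_eq_left hke]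
  have hztake : (seq.zip (pvPos N)).take k =
      (List.range k).map (fun j : Nat => (p0.2, 2 * (j : Int))) := by
    rw [pv_take_zip, hseqtake, hpostake]
    rw [show List.replicate k p0.2 = (List.range k).map (fun _ => p0.2) by
      rw [List.map_const']; simp]
    rw [List.zip_map']
  have hst1 : pvAssign (List.replicate N.toNat none)
        ((List.range k).map (fun j : Nat => (p0.2, 0 + 2 * (j : Int)))) =
      pvAssign (List.replicate N.toNat none) ((seq.zip (pvPos N)).take k) := by
    rw [hztake]
    congr 1
    exact List.map_congr_left fun j _ => by norm_num
  -- apply the main loop lemma at k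
  rw [pv_loop2_eq N seq hN hseqlen ((N - p0.1).toNat + 1) k (p1 :: tl)
      _ _ (N - p0.1) hkn
      (fun p hp => hnnall p (by rw [hps]; simp [hp]))
      (by rw [← hkc] at hsum0; omega)
      (Or.inr ⟨p1.1, p1.2, tl, by simp, hp1pos⟩)
      hseqdrop.symm
      hst1
      (by unfold pvNx; split_ifs <;> omega)
      (by omega)]
  -- reassemble both sides into the full assignment
  rw [hst1, ← pv_assign_append, List.take_append_drop]
  rfl
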